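-- pv_equiv track=rewrite | github.com/zeyu-chen/25t1-comp9021-labs | Lab 5/Solutions/ex_4_sol.py | f4_3
-- ===== SOURCE A (Python) =====
-- def f4_3(L: list[int]) -> list[list[int]]:
--     """
--     Process a list into sublists where beginning and end have the same number of 2-element lists.
--
--     The function creates a list with:
--     - At its beginning: n sublists of 2 elements
--     - In the middle: remaining elements (if any)
--     - At its end: n sublists of 2 elements
--     Where n is as large as possible.
--
--     This implementation uses a recursive approach and mathematical optimization.
--
--     Args:
--         L: A list of integers
--
--     Returns:
--         A list of sublists structured as described
--     """
--     # Base cases for recursion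
--     if not L:
--         return []
--     if len(L) <= 3:
--         return [L]
--
--     # Helper function to create list of pairs - no loops
--     def create_pairs(lst):
--         return [lst[i:i+2] for i in range(0, len(lst), 2) if i+1 < len(lst)]
--
--     # For even length lists, we can optimize by just creating pairs
--     if len(L) % 2 == 0:
--         return create_pairs(L)
--
--     # For odd length lists, we need to carefully balance the pairs
--     # Calculate the optimal number of elements for pairs on each end
--     # For maximum pairs, we calculate floor(n/4) pairs on each end
--     n = len(L)
--     pair_elements = (n // 4) * 2
--
--     # Extract elements for pairs on both ends
--     left_elements = L[:pair_elements]
--     right_elements = L[n-pair_elements:]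
--
--     # Create the pairs from left and right elements
--     left_pairs = create_pairs(left_elements)
--     right_pairs = create_pairs(right_elements)
--
--     # Extract middle elements
--     middle_elements = L[pair_elements:n-pair_elements]
--
--     # Combine the parts - if middle has elements, include as a sublist
--     if middle_elements:
--         return left_pairs + [middle_elements] + right_pairs
--     else:
--         return left_pairs + right_pairs
-- ===== SOURCE B (Python) =====
-- def f4_3(L: list[int]) -> list[list[int]]:
--     left, right = [], []
--     i, j = 0, len(L)
--     while j - i >= 4:
--         left.append(L[i:i+2])
--         right.append(L[j-2:j])
--         i += 2
--         j -= 2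
--     if i < j:
--         left.append(L[i:j])
--     left.extend(reversed(right))
--     return left
-- ===== Notes on version B (the rewrite author's own statement) =====
-- stated objective: simpler
-- what changed: Replaces A's four-way case analysis (empty / len<=3 / even-length pair comprehension / odd-length n//4 slice arithmetic) with one two-pointer loop that peels a pair off each end and keeps whatever is left as the middle sublist.
import Mathlib
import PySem

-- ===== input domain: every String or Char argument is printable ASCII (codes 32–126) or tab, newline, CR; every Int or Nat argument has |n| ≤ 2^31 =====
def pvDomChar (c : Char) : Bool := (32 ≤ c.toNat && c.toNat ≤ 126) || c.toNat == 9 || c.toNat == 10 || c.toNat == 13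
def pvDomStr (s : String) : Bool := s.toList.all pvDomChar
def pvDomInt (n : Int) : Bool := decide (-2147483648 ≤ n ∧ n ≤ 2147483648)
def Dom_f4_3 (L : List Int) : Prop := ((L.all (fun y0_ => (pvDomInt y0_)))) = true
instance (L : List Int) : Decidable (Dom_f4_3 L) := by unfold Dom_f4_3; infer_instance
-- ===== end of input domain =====

-- B replaces A's four-way case analysis (empty / short / even-length comprehension /
-- odd-length n//4 index arithmetic) with a short recursion peeling one pair off each end;
-- objective: simpler.

-- ===== PORT A =====
-- helper create_pairs: [lst[i:i+2] for i in range(0, len(lst), 2) if i+1 < len(lst)]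
def createPairs (lst : List Int) : List (List Int) :=
  ((PySem.List.pyRange 0 lst.length 2).filter
      (fun i => decide (i + 1 < (lst.length : Int)))).map
    (fun i => PySem.List.slice lst (some i) (some (i + 2)))


def f4_3 (L : List Int) : List (List Int) :=
  if L = [] then []
  else if L.length ≤ 3 then [L]
  else if L.length % 2 = 0 then createPairs L
  else
    let n : Int := L.length
    let pairElements : Int := (PySem.Int.floordiv n 4) * 2
    let leftElements := PySem.List.slice L none (some pairElements)
    let rightElements := PySem.List.slice L (some (n - pairElements)) none
    let leftPairs := createPairs leftElements
    let rightPairs := createPairs rightElements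
    let middleElements := PySem.List.slice L (some pairElements) (some (n - pairElements))
    if middleElements ≠ [] then leftPairs ++ [middleElements] ++ rightPairs
    else leftPairs ++ rightPairs


-- ===== PORT B =====
def altLoop (L : List Int) (i j : Int) (left right : List (List Int)) :
    Int × Int × List (List Int) × List (List Int) :=
  if 4 ≤ j - i then
    altLoop L (i + 2) (j - 2)
      (left ++ [PySem.List.slice L (some i) (some (i + 2))])
      (right ++ [PySem.List.slice L (some (j - 2)) (some j)])
  else (i, j, left, right)
termination_by (j - i).toNat
decreasing_by omega


def f4_3_alt (L : List Int) : List (List Int) :=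
  match altLoop L 0 (L.length : Int) [] [] with
  | (i, j, left, right) =>
    (if i < j then left ++ [PySem.List.slice L (some i) (some j)] else left) ++ right.reverse

-- proof-side: the same peeling expressed as structural recursion on the sublist

-- ===== PRECONDITION & SPEC =====
def Spec_f4_3 (L : List Int) (out : List (List Int)) : Prop := out = f4_3_alt L
instance (L : List Int) (out : List (List Int)) : Decidable (Spec_f4_3 L out) := by unfold Spec_f4_3; infer_instance

-- ===== CLAIM (what is proved, stated in full; the proofs are below) =====
def Claim_equal_f4_3 : Prop := ∀ (L : List Int), Dom_f4_3 L → Spec_f4_3 L (f4_3 L)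

-- ===== LEMMAS AND PROOFS =====

-- proof-side reference: the list of consecutive pairs (dangling last element dropped)
def pairsRec : List Int → List (List Int)
  | a :: b :: t => [a, b] :: pairsRec t
  | _ => []


theorem cp_nat (lst : List Int) : createPairs lst =
    ((List.range ((lst.length + 1) / 2)).filter (fun k => decide (2 * k + 1 < lst.length))).map
      (fun k => (lst.drop (2 * k)).take 2) := by
  unfold createPairs
  rw [PySem.List.pyRange_of_pos 0 lst.length (by omega)]
  rw [List.filter_map, List.map_map]
  have h1 : (if (0:Int) < lst.length then (((lst.length:Int) - 0 + 2 - 1) / 2).toNat else 0)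
      = (lst.length + 1) / 2 := by
    split_ifs with h
    · omega
    · omega
  rw [h1]
  congr 1
  · funext k
    simp only [Function.comp]
    have : (0 + 2 * (k:Int)) = ((2*k : Nat) : Int) := by push_cast; ring
    rw [this]
    have : ((2*k : Nat) : Int) + 2 = ((2*k : Nat) : Int) + ((2:Nat) : Int) := by norm_num
    rw [this, PySem.List.slice_natCast_add]
  · apply List.filter_congr
    intro k _
    simp only [Function.comp, decide_eq_decide]
    omega


theorem createPairs_eq_pairsRec (lst : List Int) : createPairs lst = pairsRec lst := by
  induction lst using pairsRec.induct with
  | case1 a b t ih =>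
    rw [cp_nat]
    have hlen : (a :: b :: t).length = t.length + 2 := by simp
    rw [hlen]
    have h2 : (t.length + 2 + 1) / 2 = (t.length + 1) / 2 + 1 := by omega
    rw [h2, List.range_succ_eq_map]
    rw [List.filter_cons]
    have h0 : (decide (2 * 0 + 1 < t.length + 2)) = true := by simp
    rw [h0]
    simp only [if_true]
    rw [List.filter_map, List.map_cons, List.map_map]
    show _ :: _ = [a, b] :: pairsRec t
    congr 1
    rw [← ih, cp_nat]
    have hf : ((fun k => List.take 2 (List.drop (2 * k) (a :: b :: t))) ∘ Nat.succ)
        = (fun k => List.take 2 (List.drop (2 * k) t)) := by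
      funext k
      simp only [Function.comp]
      rw [show 2 * Nat.succ k = 2 * k + 1 + 1 from by omega,
        List.drop_succ_cons, List.drop_succ_cons]
    have hp : ((fun k => decide (2 * k + 1 < t.length + 2)) ∘ Nat.succ)
        = (fun k => decide (2 * k + 1 < t.length)) := by
      funext k
      simp only [Function.comp, decide_eq_decide]
      omega
    rw [hf, hp]
  | case2 l h =>
    rcases l with _ | ⟨x, _ | ⟨y, t⟩⟩
    · rfl
    · rw [cp_nat]; simp [pairsRec]
    · exact absurd rfl (h x y t)


theorem pairsRec_two {l : List Int} (h : l.length = 2) : pairsRec l = [l] := by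
  match l, h with
  | [a, b], _ => rfl


theorem pairsRec_append {X Y : List Int} (h : X.length % 2 = 0) :
    pairsRec (X ++ Y) = pairsRec X ++ pairsRec Y := by
  induction X using pairsRec.induct with
  | case1 a b t ih =>
    simp only [List.cons_append, pairsRec, List.length_cons] at *
    rw [ih (by omega)]
  | case2 l hl =>
    rcases l with _ | ⟨x, _ | ⟨y, t⟩⟩
    · simp [pairsRec]
    · simp at h
    · exact absurd rfl (hl x y t)


theorem pairsRec_peel_last {t : List Int} (h2 : t.length % 2 = 0) (h1 : t ≠ []) :
    pairsRec t = pairsRec (t.take (t.length - 2)) ++ [t.drop (t.length - 2)] := by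
  have h0 : t.length ≠ 0 := by simpa [List.length_eq_zero_iff] using h1
  have hlen2 : (t.drop (t.length - 2)).length = 2 := by
    rw [List.length_drop]; omega
  conv_lhs => rw [← List.take_append_drop (t.length - 2) t]
  rw [pairsRec_append (by rw [List.length_take]; omega)]
  rw [pairsRec_two hlen2]


theorem f4_3_even {L : List Int} (h : L.length % 2 = 0) : f4_3 L = pairsRec L := by
  unfold f4_3
  split_ifs with hnil hle
  · subst hnil; rfl
  · have h0 : L.length ≠ 0 := by simpa [List.length_eq_zero_iff] using hnil
    have : L.length = 2 := by omega
    rw [pairsRec_two this]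
  · exact createPairs_eq_pairsRec L


theorem f4_3_odd {L : List Int} (h : L.length % 2 = 1) (h4 : 4 ≤ L.length) :
    f4_3 L = pairsRec (L.take (L.length / 4 * 2))
      ++ [(L.drop (L.length / 4 * 2)).take (L.length - 2 * (L.length / 4 * 2))]
      ++ pairsRec (L.drop (L.length - L.length / 4 * 2)) := by
  have h0 : L ≠ [] := by
    intro hh; rw [hh] at h4; simp at h4
  unfold f4_3
  rw [if_neg h0, if_neg (by omega), if_neg (by omega)]
  set k : Nat := L.length / 4 * 2 with hk
  have hpe : (PySem.Int.floordiv (L.length : Int) 4) * 2 = ((k : Nat) : Int) := by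
    rw [show ((4:Int)) = ((4:Nat):Int) from rfl, PySem.Int.floordiv_natCast, hk]
    omega
  simp only [hpe]
  have hsub : ((L.length : Int) - ((k:Nat):Int)) = (((L.length - k : Nat)) : Int) := by
    have : k ≤ L.length := by omega
    omega
  rw [hsub]
  rw [PySem.List.slice_to_natCast, PySem.List.slice_from_natCast]
  rw [PySem.List.slice_natCast]
  have hmidlen : ((L.drop k).take (L.length - k - k)).length = L.length % 4 := by
    simp only [List.length_take, List.length_drop]
    omega
  have hmidne : (L.drop k).take (L.length - k - k) ≠ [] := by
    intro hh
    rw [hh] at hmidlen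
    simp at hmidlen
    omega
  rw [if_pos hmidne]
  rw [createPairs_eq_pairsRec, createPairs_eq_pairsRec]
  have : L.length - k - k = L.length - 2 * k := by omega
  rw [this]


theorem f4_3_small {L : List Int} (h0 : L ≠ []) (h3 : L.length ≤ 3) : f4_3 L = [L] := by
  unfold f4_3
  rw [if_neg h0, if_pos h3]


theorem f4_3_rec_aux (a b : Int) (t : List Int) (h : 2 ≤ t.length) :
    f4_3 (a :: b :: t) =
      [[a, b]] ++ f4_3 (t.take (t.length - 2)) ++ [t.drop (t.length - 2)] := by
  have hn : (a :: b :: t).length = t.length + 2 := by simp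
  have htne : t ≠ [] := by intro hh; rw [hh] at h; simp at h
  by_cases hpar : t.length % 2 = 0
  · -- even
    have hIlen : (t.take (t.length - 2)).length = t.length - 2 := by
      rw [List.length_take]; omega
    rw [f4_3_even (by rw [hn]; omega), f4_3_even (by rw [hIlen]; omega)]
    show [a, b] :: pairsRec t = _
    rw [pairsRec_peel_last hpar htne]
    simp
  · -- odd
    have hodd : (a :: b :: t).length % 2 = 1 := by rw [hn]; omega
    rw [f4_3_odd hodd (by rw [hn]; omega), hn]
    by_cases h5 : t.length ≤ 5
    · -- t.length = 3 or 5: k = 2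
      have e1 : (t.length + 2) / 4 * 2 = 2 := by omega
      rw [e1]
      have e2 : (a :: b :: t).take 2 = [a, b] := rfl
      have e3 : (a :: b :: t).drop 2 = t := rfl
      have e4 : t.length + 2 - 2 * 2 = t.length - 2 := by omega
      have e5 : (a :: b :: t).drop (t.length + 2 - 2) = t.drop (t.length - 2) := by
        rw [show t.length + 2 - 2 = (t.length - 2) + 1 + 1 from by omega,
          List.drop_succ_cons, List.drop_succ_cons]
      rw [e2, e3, e4, e5]
      rw [pairsRec_two rfl, pairsRec_two (by rw [List.length_drop]; omega)]
      rw [f4_3_small (by intro hh; have := congrArg List.length hh; simp at this; omega)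
        (by rw [List.length_take]; omega)]
    · -- t.length ≥ 7 odd
      have h7 : 7 ≤ t.length := by omega
      have hk4 : 4 ≤ (t.length + 2) / 4 * 2 := by omega
      set m := t.length with hm
      -- abbreviation k for the pair-element count of the full list
      have hIlen : (t.take (m - 2)).length = m - 2 := by
        rw [List.length_take]; omega
      have hIodd : (t.take (m - 2)).length % 2 = 1 := by rw [hIlen]; omega
      rw [f4_3_odd hIodd (by rw [hIlen]; omega), hIlen]
      have hkI : (m - 2) / 4 * 2 = (m + 2) / 4 * 2 - 2 := by omega
      rw [hkI]
      have hkle : (m + 2) / 4 * 2 ≤ m - 2 := by omega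
      have hk2 : 2 * ((m + 2) / 4 * 2) ≤ m + 2 := by omega
      -- piece 1
      have p1 : pairsRec ((a :: b :: t).take ((m + 2) / 4 * 2))
          = [[a, b]] ++ pairsRec ((t.take (m - 2)).take ((m + 2) / 4 * 2 - 2)) := by
        rw [show (m + 2) / 4 * 2 = ((m + 2) / 4 * 2 - 2) + 1 + 1 from by omega,
          List.take_succ_cons, List.take_succ_cons]
        rw [List.take_take, min_eq_left (by omega)]
        rfl
      -- piece 2
      have p2 : ((a :: b :: t).drop ((m + 2) / 4 * 2)).take (m + 2 - 2 * ((m + 2) / 4 * 2))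
          = ((t.take (m - 2)).drop ((m + 2) / 4 * 2 - 2)).take
              (m - 2 - 2 * ((m + 2) / 4 * 2 - 2)) := by
        rw [show (m + 2) / 4 * 2 = ((m + 2) / 4 * 2 - 2) + 1 + 1 from by omega,
          List.drop_succ_cons, List.drop_succ_cons, List.drop_take, List.take_take]
        congr 1
        omega
      -- piece 3
      have p3 : pairsRec ((a :: b :: t).drop (m + 2 - (m + 2) / 4 * 2))
          = pairsRec ((t.take (m - 2)).drop (m - 2 - ((m + 2) / 4 * 2 - 2)))
              ++ [t.drop (m - 2)] := by
        have hR : (t.drop (m - (m + 2) / 4 * 2)).length = (m + 2) / 4 * 2 := by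
          rw [List.length_drop]; omega
        have e1 : (a :: b :: t).drop (m + 2 - (m + 2) / 4 * 2)
            = t.drop (m - (m + 2) / 4 * 2) := by
          rw [show m + 2 - (m + 2) / 4 * 2 = (m - (m + 2) / 4 * 2) + 1 + 1 from by omega,
            List.drop_succ_cons, List.drop_succ_cons]
        rw [e1, pairsRec_peel_last (by rw [hR]; omega)
          (by intro hh; have := congrArg List.length hh; rw [hR] at this; simp at this; omega)]
        rw [hR]
        congr 1
        · congr 1
          rw [List.drop_take]
          have e2 : m - 2 - ((m + 2) / 4 * 2 - 2) = m - (m + 2) / 4 * 2 := by omega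
          rw [e2]
          congr 1
          omega
        · rw [List.drop_drop]
          congr 2
          omega
      rw [p1, p2, p3]
      simp


theorem f4_3_rec {L : List Int} (h : 4 ≤ L.length) :
    f4_3 L = [L.take 2] ++ f4_3 ((L.drop 2).take (L.length - 4)) ++ [L.drop (L.length - 2)] := by
  obtain ⟨a, b, t, rfl⟩ : ∃ a b t, L = a :: b :: t := by
    rcases L with _ | ⟨a, _ | ⟨b, t⟩⟩ <;> simp at h
    exact ⟨a, b, t, rfl⟩
  have ht2 : 2 ≤ t.length := by simp at h; omega
  have e1 : (a :: b :: t).take 2 = [a, b] := rfl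
  have e2 : (a :: b :: t).drop 2 = t := rfl
  have e3 : (a :: b :: t).length - 4 = t.length - 2 := by simp
  have e4 : (a :: b :: t).drop ((a :: b :: t).length - 4 + 2) = t.drop (t.length - 2) := by
    rw [show (a :: b :: t).length - 4 + 2 = (t.length - 2) + 1 + 1 from by simp,
      List.drop_succ_cons, List.drop_succ_cons]
  have e5 : (a :: b :: t).drop ((a :: b :: t).length - 2) = t.drop (t.length - 2) := by
    rw [show (a :: b :: t).length - 2 = (t.length - 2) + 1 + 1 from by simp; omega,
      List.drop_succ_cons, List.drop_succ_cons]
  rw [e1, e2, e3, e5]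
  exact f4_3_rec_aux a b t ht2


-- proof-side: B's peeling loop as structural recursion on the sublist
def peelRec (M : List Int) : List (List Int) :=
  if _h : M.length < 4 then (if M = [] then [] else [M])
  else [M.take 2] ++ peelRec ((M.drop 2).take (M.length - 4)) ++ [M.drop (M.length - 2)]
termination_by M.length
decreasing_by simp only [List.length_take, List.length_drop]; omega


theorem slice_len (L : List Int) (i j : Int) (h0 : 0 ≤ i) (hij : i ≤ j) (hn : j ≤ L.length) :
    (PySem.List.slice L (some i) (some j)).length = (j - i).toNat := by
  rw [PySem.List.slice_toNat L h0 (by omega : (0:Int) ≤ j)]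
  simp only [List.length_take, List.length_drop]
  omega


theorem loop_spec (fuel : Nat) (L : List Int) (i j : Int) (left right : List (List Int))
    (hf : (j - i).toNat ≤ fuel) (h0 : 0 ≤ i) (hij : i ≤ j) (hn : j ≤ L.length) :
    (match altLoop L i j left right with
     | (i', j', l, r) =>
       (if i' < j' then l ++ [PySem.List.slice L (some i') (some j')] else l) ++ r.reverse)
    = left ++ peelRec (PySem.List.slice L (some i) (some j)) ++ right.reverse := by
  induction fuel generalizing i j left right with
  | zero =>
    have hij' : i = j := by omega
    rw [altLoop, if_neg (by omega)]
    simp only [if_neg (by omega : ¬ i < j)]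
    rw [peelRec, dif_pos (by rw [slice_len L i j h0 hij hn]; omega),
      if_pos (by
        apply List.eq_nil_of_length_eq_zero
        rw [slice_len L i j h0 hij hn]
        omega)]
    simp
  | succ n ih =>
    by_cases h4 : 4 ≤ j - i
    · rw [altLoop, if_pos h4]
      rw [ih (i + 2) (j - 2) _ _ (by omega) (by omega) (by omega) (by omega)]
      conv_rhs => rw [peelRec]
      rw [dif_neg (by rw [slice_len L i j h0 hij hn]; omega)]
      rw [slice_len L i j h0 hij hn]
      have hzj : (0:Int) ≤ j := by omega
      have e1 : (PySem.List.slice L (some i) (some j)).take 2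
          = PySem.List.slice L (some i) (some (i + 2)) := by
        rw [PySem.List.slice_toNat L h0 hzj, PySem.List.slice_toNat L h0 (by omega),
          List.take_take]
        congr 1
        omega
      have e2 : ((PySem.List.slice L (some i) (some j)).drop 2).take ((j - i).toNat - 4)
          = PySem.List.slice L (some (i + 2)) (some (j - 2)) := by
        rw [PySem.List.slice_toNat L h0 hzj, PySem.List.slice_toNat L (by omega) (by omega),
          List.drop_take, List.drop_drop, List.take_take]
        congr 1
        · omega
        · congr 1
          omega
      have e3 : (PySem.List.slice L (some i) (some j)).drop ((j - i).toNat - 2)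
          = PySem.List.slice L (some (j - 2)) (some j) := by
        rw [PySem.List.slice_toNat L h0 hzj, PySem.List.slice_toNat L (by omega) hzj,
          List.drop_take, List.drop_drop]
        congr 1
        · omega
        · congr 1
          omega
      rw [e1, e2, e3]
      simp
    · rw [altLoop, if_neg h4]
      by_cases hlt : i < j
      · simp only [if_pos hlt]
        rw [peelRec, dif_pos (by rw [slice_len L i j h0 hij hn]; omega),
          if_neg (by
            intro hh
            have := congrArg List.length hh
            rw [slice_len L i j h0 hij hn] at this
            simp at this
            omega)]
      · simp only [if_neg hlt]
        rw [peelRec, dif_pos (by rw [slice_len L i j h0 hij hn]; omega),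
          if_pos (by
            apply List.eq_nil_of_length_eq_zero
            rw [slice_len L i j h0 hij hn]
            omega)]
        simp


theorem alt_eq_peel (L : List Int) : f4_3_alt L = peelRec L := by
  unfold f4_3_alt
  rw [loop_spec ((L.length : Int) - 0).toNat L 0 (L.length : Int) [] [] le_rfl
    (by omega) (by omega) le_rfl]
  rw [show PySem.List.slice L (some 0) (some (L.length : Int)) = L from by
    rw [PySem.List.slice_toNat L (by omega) (by omega)]
    simp]
  simp

theorem f4_3_eq_peel (L : List Int) : f4_3 L = peelRec L := by
  have key : ∀ n, ∀ L : List Int, L.length ≤ n → f4_3 L = peelRec L := by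
    intro n
    induction n with
    | zero =>
      intro L hL
      have : L = [] := by
        cases L
        · rfl
        · simp at hL
      subst this
      rw [peelRec]
      simp [f4_3]
    | succ n ih =>
      intro L hL
      by_cases h4 : L.length < 4
      · rw [peelRec, dif_pos h4]
        by_cases h0 : L = []
        · subst h0; rfl
        · rw [if_neg h0, f4_3_small h0 (by omega)]
      · have h4' : 4 ≤ L.length := by omega
        rw [f4_3_rec h4', peelRec, dif_neg h4]
        congr 2
        apply ih
        rw [List.length_take, List.length_drop]
        omega
  exact key L.length L le_rfl

theorem main_eq (L : List Int) : f4_3 L = f4_3_alt L := by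
  rw [alt_eq_peel]
  exact f4_3_eq_peel L

-- ===== VERDICT (by name: the statement is the Claim_ definition above) =====
theorem f4_3_spec : Claim_equal_f4_3 := by
  intro L _
  unfold Spec_f4_3
  exact main_eq L
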